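-- pv_equiv track=rewrite | github.com/airaneel/juzzy-agent-strategies | output_parser/cot_output_parser.py | _strip_think_tags
-- ===== SOURCE A (Python) =====
-- def _strip_think_tags(text: str, in_think: bool) -> tuple[str, bool]:
--     """Strip <think>…</think> blocks, handling chunks that span tags.
--
--     Returns (cleaned_text, still_inside_think).
--     """
--     if not in_think and "<" not in text:
--         return text, False
--
--     result: list[str] = []
--     pos = 0
--     while pos < len(text):
--         if in_think:
--             end = text.find("</think>", pos)
--             if end == -1:
--                 break  # rest consumed
--             in_think = False
--             pos = end + len("</think>")
--         else:
--             start = text.find("<think>", pos)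
--             if start == -1:
--                 result.append(text[pos:])
--                 break
--             result.append(text[pos:start])
--             in_think = True
--             pos = start + len("<think>")
--
--     return "".join(result), in_think
-- ===== SOURCE B (Python) =====
-- def _strip_think_tags(text: str, in_think: bool) -> tuple[str, bool]:
--     """Strip <think>...</think> blocks, handling chunks that span tags.
--
--     Character-level state machine: walk the text once, copying characters
--     while outside a think block and toggling the state on the two tags.
--     Returns (cleaned_text, still_inside_think).
--     """
--     out = []
--     i = 0
--     n = len(text)
--     while i < n:
--         if in_think:
--             if text.startswith("</think>", i):
--                 in_think = False
--                 i += 8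
--             else:
--                 i += 1
--         else:
--             if text.startswith("<think>", i):
--                 in_think = True
--                 i += 7
--             else:
--                 out.append(text[i])
--                 i += 1
--     return "".join(out), in_think
-- ===== Notes on version B (the rewrite author's own statement) =====
-- stated objective: alternative
-- what changed: A jumps between tags with str.find and appends slices of the text; B is a single character-level state machine that walks the text once, copying characters while outside a think block and toggling the state on startswith of the two tags, with no find/slice and no fast-path branch.
import Mathlib
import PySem

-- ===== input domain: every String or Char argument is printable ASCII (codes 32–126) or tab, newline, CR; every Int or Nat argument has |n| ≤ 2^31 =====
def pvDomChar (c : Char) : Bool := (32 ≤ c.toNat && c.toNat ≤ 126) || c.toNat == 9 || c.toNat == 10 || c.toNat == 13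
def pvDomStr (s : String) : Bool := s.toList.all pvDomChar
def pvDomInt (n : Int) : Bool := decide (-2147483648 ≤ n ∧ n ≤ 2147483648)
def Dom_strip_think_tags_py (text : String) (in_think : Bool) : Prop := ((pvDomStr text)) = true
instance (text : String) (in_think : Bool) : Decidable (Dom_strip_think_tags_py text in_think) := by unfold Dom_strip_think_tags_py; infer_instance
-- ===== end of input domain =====

-- B replaces A's find/slice jump loop by a single character-level state machine
-- (one pass, copying characters while outside a think block); objective: alternative, no speed claim.

def pvTagOpen : List Char := "<think>".toList
def pvTagClose : List Char := "</think>".toList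

-- ===== PORT A =====
-- the while loop of A: state (pos, in_think, result); text.find(tag, pos) is Chars.findFrom
def stripALoop (cs : List Char) (pos : Nat) (in_think : Bool) (result : List (List Char)) :
    List (List Char) × Bool :=
  if hlt : pos < cs.length then
    if in_think then
      -- end = text.find("</think>", pos)
      if he : PySem.Chars.findFrom cs pvTagClose (pos : Int) = -1 then
        (result, in_think)   -- break: rest consumed
      else stripALoop cs ((PySem.Chars.findFrom cs pvTagClose (pos : Int)).toNat + 8) false result
    else
      -- start = text.find("<think>", pos)
      if hs : PySem.Chars.findFrom cs pvTagOpen (pos : Int) = -1 then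
        (result ++ [PySem.List.slice cs (some (pos : Int)) none], in_think)
      else stripALoop cs ((PySem.Chars.findFrom cs pvTagOpen (pos : Int)).toNat + 7) true
        (result ++ [PySem.List.slice cs (some (pos : Int))
          (some (PySem.Chars.findFrom cs pvTagOpen (pos : Int)))])
  else (result, in_think)
  termination_by cs.length - pos
  decreasing_by
  · have h := PySem.Chars.findFrom_natCast cs pvTagClose pos (by omega)
    by_cases hf : PySem.Chars.find (List.drop pos cs) pvTagClose = -1
    · rw [h, if_pos hf] at he; exact absurd rfl he
    · have h0 : 0 ≤ PySem.Chars.find (List.drop pos cs) pvTagClose := by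
        have := PySem.Chars.neg_one_le_find (List.drop pos cs) pvTagClose
        omega
      rw [h, if_neg hf]
      omega
  · have h := PySem.Chars.findFrom_natCast cs pvTagOpen pos (by omega)
    by_cases hf : PySem.Chars.find (List.drop pos cs) pvTagOpen = -1
    · rw [h, if_pos hf] at hs; exact absurd rfl hs
    · have h0 : 0 ≤ PySem.Chars.find (List.drop pos cs) pvTagOpen := by
        have := PySem.Chars.neg_one_le_find (List.drop pos cs) pvTagOpen
        omega
      rw [h, if_neg hf]
      omega

def strip_think_tags_py (text : String) (in_think : Bool) : String × Bool :=
  if !in_think && !(PySem.Str.isIn "<" text) then (text, false)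
  else
    let r := stripALoop text.toList 0 in_think []
    (String.ofList (PySem.Chars.join [] r.1), r.2)

-- ===== PORT B =====
-- the while loop of B: walks the suffix starting at i; text.startswith(tag, i) is
-- Chars.startswith on the suffix
def stripBGo (cs : List Char) (in_think : Bool) : List Char × Bool :=
  match cs with
  | [] => ([], in_think)
  | c :: rest =>
    if in_think then
      if PySem.Chars.startswith (c :: rest) pvTagClose then
        stripBGo (List.drop 8 (c :: rest)) false
      else
        stripBGo rest true
    else
      if PySem.Chars.startswith (c :: rest) pvTagOpen then
        stripBGo (List.drop 7 (c :: rest)) true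
      else
        let r := stripBGo rest false
        (c :: r.1, r.2)
  termination_by cs.length
  decreasing_by all_goals (simp; try omega)

def strip_think_tags_py_alt (text : String) (in_think : Bool) : String × Bool :=
  let r := stripBGo text.toList in_think
  (String.ofList r.1, r.2)

-- ===== PRECONDITION & SPEC =====
def Spec_strip_think_tags_py (text : String) (in_think : Bool) (out : String × Bool) : Prop := out = strip_think_tags_py_alt text in_think
instance (text : String) (in_think : Bool) (out : String × Bool) : Decidable (Spec_strip_think_tags_py text in_think out) := by unfold Spec_strip_think_tags_py; infer_instance

-- ===== CLAIM (what is proved, stated in full; the proofs are below) =====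
def Claim_equal_strip_think_tags_py : Prop := ∀ (text : String) (in_think : Bool), Dom_strip_think_tags_py text in_think → Spec_strip_think_tags_py text in_think (strip_think_tags_py text in_think)

-- ===== LEMMAS AND PROOFS =====

lemma join_nil_eq_flatten (l : List (List Char)) : PySem.Chars.join [] l = l.flatten := by
  simp only [PySem.Chars.join, List.intercalate]
  induction l with
  | nil => simp
  | cons a t ih =>
    cases t with
    | nil => simp
    | cons b t' => simpa [List.intersperse] using ih

-- find points at m when there is a match at m and none before it
lemma find_eq_of_first {sub l : List Char} {m : Nat}
    (h1 : sub <+: List.drop m l) (h2 : ∀ p < m, ¬ sub <+: List.drop p l) :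
    PySem.Chars.find l sub = (m : Int) := by
  have hinf : sub <:+: l := h1.isInfix.trans (List.drop_suffix m l).isInfix
  have hnn : 0 ≤ PySem.Chars.find l sub := (PySem.Chars.find_nonneg_iff l sub).mpr hinf
  obtain ⟨hpre, hmin⟩ := PySem.Chars.find_spec hnn
  rcases lt_trichotomy (PySem.Chars.find l sub).toNat m with h | h | h
  · exact absurd hpre (h2 _ h)
  · omega
  · exact absurd h1 (hmin m h)

lemma find_hit_bound {ds sub : List Char} (h0 : 0 ≤ PySem.Chars.find ds sub) :
    (PySem.Chars.find ds sub).toNat + sub.length ≤ ds.length := by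
  obtain ⟨hpre, -⟩ := PySem.Chars.find_spec h0
  have hle := hpre.length_le
  simp [List.length_drop] at hle
  have h2 := PySem.Chars.find_le_length ds sub
  omega

lemma find_cons_not_prefix {sub : List Char} (c : Char) (t : List Char)
    (hnp : ¬ sub <+: (c :: t)) :
    PySem.Chars.find (c :: t) sub =
      if PySem.Chars.find t sub = -1 then -1 else PySem.Chars.find t sub + 1 := by
  by_cases hft : PySem.Chars.find t sub = -1
  · rw [if_pos hft]
    rw [PySem.Chars.find_eq_neg_one_iff] at hft ⊢
    intro hinf
    have hex : ∃ j, sub <+: List.drop j (c :: t) := by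
      rw [PySem.Chars.exists_prefix_drop_iff_isIn, PySem.Chars.isIn_iff_infix]
      exact hinf
    obtain ⟨j, hj⟩ := hex
    cases j with
    | zero => exact hnp (by simpa using hj)
    | succ q =>
      apply hft
      exact hj.isInfix.trans (List.drop_suffix q t).isInfix
  · rw [if_neg hft]
    have h0 : 0 ≤ PySem.Chars.find t sub := by
      have := PySem.Chars.neg_one_le_find t sub
      omega
    obtain ⟨hpre, hmin⟩ := PySem.Chars.find_spec h0
    set m := (PySem.Chars.find t sub).toNat with hmdef
    have : PySem.Chars.find (c :: t) sub = ((m + 1 : Nat) : Int) := by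
      apply find_eq_of_first
      · simpa using hpre
      · intro p hp
        cases p with
        | zero => simpa using hnp
        | succ q => simpa using hmin q (by omega)
    rw [this]
    omega

lemma find_of_prefix {sub l : List Char} (hp : sub <+: l) :
    PySem.Chars.find l sub = 0 := by
  simpa using find_eq_of_first (m := 0) (by simpa using hp) (by omega)

-- unfolding stripBGo through find: the in-think scan jumps to the first "</think>"
lemma stripBGo_true_eq (ds : List Char) :
    stripBGo ds true =
      if PySem.Chars.find ds pvTagClose = -1 then ([], true)
      else stripBGo (List.drop ((PySem.Chars.find ds pvTagClose).toNat + 8) ds) false := by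
  induction ds with
  | nil =>
    simp [stripBGo, show PySem.Chars.find ([] : List Char) pvTagClose = -1 from by decide]
  | cons c t ih =>
    by_cases hp : pvTagClose <+: (c :: t)
    · have hsw : PySem.Chars.startswith (c :: t) pvTagClose = true :=
        (PySem.Chars.startswith_iff _ _).mpr hp
      have hf : PySem.Chars.find (c :: t) pvTagClose = 0 := find_of_prefix hp
      rw [stripBGo]
      simp only [reduceIte]
      rw [if_pos hsw, hf]
      norm_num
    · have hsw : PySem.Chars.startswith (c :: t) pvTagClose = false := by
        rw [← Bool.not_eq_true, PySem.Chars.startswith_iff]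
        exact hp
      rw [stripBGo, if_pos rfl, hsw]
      simp only [Bool.false_eq_true, if_false]
      rw [ih, find_cons_not_prefix c t hp]
      by_cases hft : PySem.Chars.find t pvTagClose = -1
      · simp [hft]
      · have h0 : 0 ≤ PySem.Chars.find t pvTagClose := by
          have := PySem.Chars.neg_one_le_find t pvTagClose
          omega
        rw [if_neg hft, if_neg hft, if_neg (by omega)]
        have : ((PySem.Chars.find t pvTagClose + 1).toNat + 8) =
            ((PySem.Chars.find t pvTagClose).toNat + 8) + 1 := by omega
        rw [this]
        simp [List.drop_succ_cons]

lemma stripBGo_false_eq (ds : List Char) :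
    stripBGo ds false =
      if PySem.Chars.find ds pvTagOpen = -1 then (ds, false)
      else
        (List.take (PySem.Chars.find ds pvTagOpen).toNat ds ++
          (stripBGo (List.drop ((PySem.Chars.find ds pvTagOpen).toNat + 7) ds) true).1,
         (stripBGo (List.drop ((PySem.Chars.find ds pvTagOpen).toNat + 7) ds) true).2) := by
  induction ds with
  | nil =>
    simp [stripBGo, show PySem.Chars.find ([] : List Char) pvTagOpen = -1 from by decide]
  | cons c t ih =>
    by_cases hp : pvTagOpen <+: (c :: t)
    · have hsw : PySem.Chars.startswith (c :: t) pvTagOpen = true :=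
        (PySem.Chars.startswith_iff _ _).mpr hp
      have hf : PySem.Chars.find (c :: t) pvTagOpen = 0 := find_of_prefix hp
      rw [stripBGo]
      simp only [Bool.false_eq_true, if_false]
      rw [if_pos hsw, hf]
      norm_num
    · have hsw : PySem.Chars.startswith (c :: t) pvTagOpen = false := by
        rw [← Bool.not_eq_true, PySem.Chars.startswith_iff]
        exact hp
      rw [stripBGo]
      simp only [Bool.false_eq_true, if_false, hsw]
      rw [ih, find_cons_not_prefix c t hp]
      by_cases hft : PySem.Chars.find t pvTagOpen = -1
      · simp [hft]
      · have h0 : 0 ≤ PySem.Chars.find t pvTagOpen := by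
          have := PySem.Chars.neg_one_le_find t pvTagOpen
          omega
        rw [if_neg hft, if_neg hft, if_neg (by omega)]
        have h1 : ((PySem.Chars.find t pvTagOpen + 1).toNat + 7) =
            ((PySem.Chars.find t pvTagOpen).toNat + 7) + 1 := by omega
        have h2 : ((PySem.Chars.find t pvTagOpen + 1).toNat) =
            ((PySem.Chars.find t pvTagOpen).toNat) + 1 := by omega
        rw [h1, h2]
        simp [List.drop_succ_cons, List.take_succ_cons]

-- the bound needed by the inductions below: a hit of `sub` at index f inside `ds` ends within `ds`
-- main invariant: A's loop from position pos computes exactly B's scan of the suffix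
lemma aLoop_eq_bGo (cs : List Char) (pos : Nat) (it : Bool) (res : List (List Char))
    (hpos : pos ≤ cs.length) :
    ((stripALoop cs pos it res).1.flatten, (stripALoop cs pos it res).2) =
      (res.flatten ++ (stripBGo (List.drop pos cs) it).1, (stripBGo (List.drop pos cs) it).2) := by
  rw [stripALoop]
  by_cases hlt : pos < cs.length
  · rw [dif_pos hlt]
    cases it with
    | true =>
      simp only [reduceIte]
      have hrw := PySem.Chars.findFrom_natCast cs pvTagClose pos (by omega)
      by_cases hf : PySem.Chars.find (List.drop pos cs) pvTagClose = -1
      · rw [dif_pos (by rw [hrw, if_pos hf])]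
        rw [stripBGo_true_eq, if_pos hf]
        simp
      · have h0 : 0 ≤ PySem.Chars.find (List.drop pos cs) pvTagClose := by
          have := PySem.Chars.neg_one_le_find (List.drop pos cs) pvTagClose
          omega
        have he : PySem.Chars.findFrom cs pvTagClose (pos : Int) =
            (pos : Int) + PySem.Chars.find (List.drop pos cs) pvTagClose := by
          rw [hrw, if_neg hf]
        rw [dif_neg (by rw [he]; omega)]
        set f := (PySem.Chars.find (List.drop pos cs) pvTagClose).toNat with hfdef
        have hbound : f + 8 ≤ cs.length - pos := by
          have hb := find_hit_bound h0
          have hcl : pvTagClose.length = 8 := by decide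
          simp [List.length_drop, hcl] at hb
          omega
        have htn : (PySem.Chars.findFrom cs pvTagClose (pos : Int)).toNat + 8 = pos + (f + 8) := by
          rw [he]; omega
        rw [htn, aLoop_eq_bGo cs (pos + (f + 8)) false res (by omega)]
        rw [stripBGo_true_eq, if_neg hf]
        rw [← hfdef, List.drop_drop]
    | false =>
      simp only [Bool.false_eq_true, if_false]
      have hrw := PySem.Chars.findFrom_natCast cs pvTagOpen pos (by omega)
      by_cases hf : PySem.Chars.find (List.drop pos cs) pvTagOpen = -1
      · rw [dif_pos (by rw [hrw, if_pos hf])]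
        rw [stripBGo_false_eq, if_pos hf]
        simp [PySem.List.slice_from_natCast]
      · have h0 : 0 ≤ PySem.Chars.find (List.drop pos cs) pvTagOpen := by
          have := PySem.Chars.neg_one_le_find (List.drop pos cs) pvTagOpen
          omega
        have he : PySem.Chars.findFrom cs pvTagOpen (pos : Int) =
            (pos : Int) + PySem.Chars.find (List.drop pos cs) pvTagOpen := by
          rw [hrw, if_neg hf]
        rw [dif_neg (by rw [he]; omega)]
        set f := (PySem.Chars.find (List.drop pos cs) pvTagOpen).toNat with hfdef
        have hbound : f + 7 ≤ cs.length - pos := by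
          have hb := find_hit_bound h0
          have hcl : pvTagOpen.length = 7 := by decide
          simp [List.length_drop, hcl] at hb
          omega
        have htn : (PySem.Chars.findFrom cs pvTagOpen (pos : Int)).toNat + 7 = pos + (f + 7) := by
          rw [he]; omega
        have hslice : PySem.List.slice cs (some (pos : Int))
            (some (PySem.Chars.findFrom cs pvTagOpen (pos : Int))) =
            List.take f (List.drop pos cs) := by
          have hcast : PySem.Chars.findFrom cs pvTagOpen (pos : Int) = ((pos + f : Nat) : Int) := by
            rw [he]; omega
          rw [hcast, PySem.List.slice_natCast]
          congr 1
          omega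
        rw [htn, hslice, aLoop_eq_bGo cs (pos + (f + 7)) true
          (res ++ [List.take f (List.drop pos cs)]) (by omega)]
        rw [stripBGo_false_eq, if_neg hf, ← hfdef, List.drop_drop]
        simp
  · rw [dif_neg hlt]
    have : pos = cs.length := by omega
    subst this
    simp [stripBGo]
  termination_by cs.length - pos

-- the fast path of A: no '<' at all means no "<think>" and B copies the text unchanged
lemma bGo_of_no_lt (cs : List Char) (h : PySem.Chars.isIn "<".toList cs = false) :
    stripBGo cs false = (cs, false) := by
  rw [stripBGo_false_eq, if_pos]
  rw [PySem.Chars.find_eq_neg_one_iff]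
  intro hinf
  rw [PySem.Chars.isIn_eq_false_iff] at h
  exact h ((List.prefix_iff_eq_take.mpr rfl : "<".toList <+: pvTagOpen).isInfix.trans hinf)

-- ===== VERDICT (by name: the statement is the Claim_ definition above) =====
theorem strip_think_tags_py_spec : Claim_equal_strip_think_tags_py := by
  intro text in_think _
  unfold Spec_strip_think_tags_py strip_think_tags_py strip_think_tags_py_alt
  by_cases hfast : (!in_think && !(PySem.Str.isIn "<" text)) = true
  · rw [if_pos hfast]
    have hin : in_think = false ∧ PySem.Str.isIn "<" text = false := by
      cases in_think <;> cases hq : PySem.Str.isIn "<" text <;> simp_all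
    have hlt : PySem.Chars.isIn "<".toList text.toList = false := by
      have h := hin.2
      simpa [PySem.Str.isIn] using h
    show (text, false) =
        (String.ofList (stripBGo text.toList in_think).1, (stripBGo text.toList in_think).2)
    rw [hin.1, bGo_of_no_lt text.toList hlt]
    simp [String.ofList_toList]
  · rw [if_neg hfast]
    have hmain := aLoop_eq_bGo text.toList 0 in_think [] (by omega)
    simp only [List.drop_zero, List.flatten_nil, List.nil_append] at hmain
    have h1 := congrArg Prod.fst hmain
    have h2 := congrArg Prod.snd hmain
    simp only at h1 h2
    show (String.ofList (PySem.Chars.join [] (stripALoop text.toList 0 in_think []).1),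
          (stripALoop text.toList 0 in_think []).2) =
        (String.ofList (stripBGo text.toList in_think).1, (stripBGo text.toList in_think).2)
    rw [join_nil_eq_flatten, h1, h2]
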